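-- pv_equiv track=rewrite | github.com/lifuyi/md2any | renderers/markdown_renderer.py | _apply_dark_mode_adjustments_to_style
-- ===== SOURCE A (Python) =====
-- def _apply_dark_mode_adjustments_to_style(style: str) -> str:
--     """Apply dark mode adjustments to inline style"""
--     # Basic dark mode transformations
--     dark_adjustments = {
--         "#ffffff": "#1a1a1a",
--         "#fff": "#1a1a1a",
--         "#333333": "#e8e8e8",
--         "#333": "#e8e8e8",
--         "#555555": "#b0b0b0",
--         "#555": "#b0b0b0",
--         "#000000": "#ffffff",
--         "#000": "#ffffff",
--         "#f8f9fa": "#2c3e50",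
--         "#ecf0f1": "#2c3e50",
--         "#f7f7f7": "#2c3e50",
--     }
--
--     adjusted_style = style
--     for light_color, dark_color in dark_adjustments.items():
--         adjusted_style = adjusted_style.replace(light_color, dark_color)
--
--     return adjusted_style
-- ===== SOURCE B (Python) =====
-- _DARK_RULES = [
--     ("#ffffff", "#1a1a1a"),
--     ("#fff", "#1a1a1a"),
--     ("#333333", "#e8e8e8"),
--     ("#333", "#e8e8e8"),
--     ("#555555", "#b0b0b0"),
--     ("#555", "#b0b0b0"),
--     ("#000000", "#ffffff"),
--     ("#000", "#ffffff"),
--     ("#f8f9fa", "#2c3e50"),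
--     ("#ecf0f1", "#2c3e50"),
--     ("#f7f7f7", "#2c3e50"),
-- ]
--
--
-- def _apply_dark_mode_adjustments_to_style(style: str) -> str:
--     """Apply dark mode adjustments to inline style (single-pass scan)."""
--     out = []
--     i = 0
--     n = len(style)
--     while i < n:
--         if style[i] == '#':
--             for light, dark in _DARK_RULES:
--                 if style.startswith(light, i):
--                     out.append(dark)
--                     i += len(light)
--                     break
--             else:
--                 out.append('#')
--                 i += 1
--         else:
--             out.append(style[i])
--             i += 1
--     return ''.join(out)
-- ===== Notes on version B (the rewrite author's own statement) =====
-- stated objective: alternative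
-- what changed: Instead of 11 sequential full-string str.replace passes (each rebuilding the whole string), B makes a single left-to-right scan that, at each hash character, substitutes the first matching rule of the same table and skips past it.
import Mathlib
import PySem

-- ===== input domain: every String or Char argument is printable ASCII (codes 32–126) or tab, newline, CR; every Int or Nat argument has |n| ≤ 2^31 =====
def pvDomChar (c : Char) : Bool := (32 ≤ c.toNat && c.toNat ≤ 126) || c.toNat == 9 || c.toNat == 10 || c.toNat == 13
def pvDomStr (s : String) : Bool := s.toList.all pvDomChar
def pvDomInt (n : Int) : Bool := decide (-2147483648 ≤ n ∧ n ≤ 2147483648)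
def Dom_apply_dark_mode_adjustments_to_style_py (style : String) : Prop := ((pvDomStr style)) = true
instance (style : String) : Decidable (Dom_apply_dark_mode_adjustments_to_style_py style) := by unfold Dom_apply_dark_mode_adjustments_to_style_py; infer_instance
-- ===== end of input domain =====

-- B replaces A's 11 sequential full-string `str.replace` passes by one left-to-right scan
-- substituting the first matching rule at each hash character (objective: alternative).

-- ===== PORT A =====
-- the dict literal of A, in insertion order
def darkAdjustmentsDict : PySem.Dict String String :=
  PySem.Dict.ofList
    [("#ffffff", "#1a1a1a"), ("#fff", "#1a1a1a"), ("#333333", "#e8e8e8"),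
     ("#333", "#e8e8e8"), ("#555555", "#b0b0b0"), ("#555", "#b0b0b0"),
     ("#000000", "#ffffff"), ("#000", "#ffffff"), ("#f8f9fa", "#2c3e50"),
     ("#ecf0f1", "#2c3e50"), ("#f7f7f7", "#2c3e50")]

-- for light_color, dark_color in dark_adjustments.items(): adjusted_style = adjusted_style.replace(...)
def apply_dark_mode_adjustments_to_style_py (style : String) : String :=
  darkAdjustmentsDict.items.foldl (fun acc p => PySem.Str.replace acc p.1 p.2) style

-- ===== PORT B =====
-- Source B's _DARK_RULES table, as char lists (same pairs, same order)
def darkRules : List (List Char × List Char) :=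
  [("#ffffff".toList, "#1a1a1a".toList), ("#fff".toList, "#1a1a1a".toList),
   ("#333333".toList, "#e8e8e8".toList), ("#333".toList, "#e8e8e8".toList),
   ("#555555".toList, "#b0b0b0".toList), ("#555".toList, "#b0b0b0".toList),
   ("#000000".toList, "#ffffff".toList), ("#000".toList, "#ffffff".toList),
   ("#f8f9fa".toList, "#2c3e50".toList), ("#ecf0f1".toList, "#2c3e50".toList),
   ("#f7f7f7".toList, "#2c3e50".toList)]

-- the inner `for light, dark in _DARK_RULES: if style.startswith(light, i)` loop
def findRule (rs : List (List Char × List Char)) (l : List Char) : Option (List Char × List Char) :=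
  match rs with
  | [] => none
  | (k, v) :: rest => if k.isPrefixOf l then some (k, v) else findRule rest l

-- needed by scanGo's termination proof (cited in decreasing_by)
theorem findRule_mem {rs : List (List Char × List Char)} {l k v : List Char}
    (h : findRule rs l = some (k, v)) : (k, v) ∈ rs ∧ k <+: l := by
  induction rs with
  | nil => simp [findRule] at h
  | cons r rest ih =>
    obtain ⟨k', v'⟩ := r
    by_cases hp : k'.isPrefixOf l
    · simp [findRule, hp] at h
      exact ⟨by simp [h.1, h.2], h.1 ▸ (List.isPrefixOf_iff_prefix.mp hp)⟩
    · simp only [findRule, if_neg hp] at h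
      exact ⟨List.mem_cons_of_mem _ (ih h).1, (ih h).2⟩

theorem darkRules_keys_pos : ∀ r ∈ darkRules, 0 < r.1.length := by decide

-- Source B's while loop over the string
def scanGo (l : List Char) : List Char :=
  match l with
  | [] => []
  | c :: t =>
    if c = '#' then
      match hfr : findRule darkRules (c :: t) with
      | some (k, dv) => dv ++ scanGo ((c :: t).drop k.length)
      | none => c :: scanGo t
    else c :: scanGo t
termination_by l.length
decreasing_by
  all_goals first
    | (simp only [List.length_cons]; omega)
    | (have h := findRule_mem hfr
       have hk := darkRules_keys_pos _ h.1
       simp at hk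
       simp only [List.length_drop, List.length_cons]
       omega)

def apply_dark_mode_adjustments_to_style_py_alt (style : String) : String :=
  String.ofList (scanGo style.toList)

-- ===== PRECONDITION & SPEC =====
def Spec_apply_dark_mode_adjustments_to_style_py (style : String) (out : String) : Prop := out = apply_dark_mode_adjustments_to_style_py_alt style
instance (style : String) (out : String) : Decidable (Spec_apply_dark_mode_adjustments_to_style_py style out) := by unfold Spec_apply_dark_mode_adjustments_to_style_py; infer_instance

-- ===== CLAIM (what is proved, stated in full; the proofs are below) =====
def Claim_equal_apply_dark_mode_adjustments_to_style_py : Prop := ∀ (style : String), Dom_apply_dark_mode_adjustments_to_style_py style → Spec_apply_dark_mode_adjustments_to_style_py style (apply_dark_mode_adjustments_to_style_py style)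

-- ===== LEMMAS AND PROOFS =====

-- `rep kt v l` = Python l.replace('#'+kt, v), a structural model of PySem.Chars.replace
def rep (kt v : List Char) : List Char → List Char
  | [] => []
  | c :: t => if ('#' :: kt).isPrefixOf (c :: t) then v ++ rep kt v (t.drop kt.length) else c :: rep kt v t
termination_by l => l.length
decreasing_by
  all_goals simp only [List.length_drop, List.length_cons]
  all_goals omega

theorem rep_nil (kt v : List Char) : rep kt v [] = [] := by rw [rep]

theorem replace_go_eq (kt v : List Char) :
    ∀ fuel (l acc : List Char), l.length ≤ fuel →
      PySem.Chars.replace.go ('#' :: kt) v fuel l acc = acc.reverse ++ rep kt v l := by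
  intro fuel
  induction fuel with
  | zero =>
    intro l acc hl
    have : l = [] := List.eq_nil_of_length_eq_zero (Nat.le_zero.mp hl)
    subst this
    rw [rep_nil]
    simp [PySem.Chars.replace.go]
  | succ n ih =>
    intro l acc hl
    match l with
    | [] =>
      rw [rep_nil]
      simp [PySem.Chars.replace.go]
    | c :: t =>
      by_cases hp : ('#' :: kt).isPrefixOf (c :: t)
      · rw [show PySem.Chars.replace.go ('#' :: kt) v (n+1) (c :: t) acc
              = PySem.Chars.replace.go ('#' :: kt) v n (List.drop ('#' :: kt).length (c :: t)) (v.reverse ++ acc) by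
            simp [PySem.Chars.replace.go, hp]]
        rw [ih _ _ (by simp only [List.length_drop, List.length_cons] at hl ⊢; omega)]
        rw [rep, if_pos hp]
        simp
      · rw [show PySem.Chars.replace.go ('#' :: kt) v (n+1) (c :: t) acc
              = PySem.Chars.replace.go ('#' :: kt) v n t (c :: acc) by
            simp [PySem.Chars.replace.go, hp]]
        rw [ih _ _ (by simp only [List.length_cons] at hl ⊢; omega)]
        rw [rep, if_neg hp]
        simp

theorem replace_eq_rep (kt v s : List Char) :
    PySem.Chars.replace s ('#' :: kt) v = rep kt v s := by
  have h := replace_go_eq kt v s.length s [] (le_refl _)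
  simp only [List.reverse_nil, List.nil_append] at h
  simp only [PySem.Chars.replace, List.isEmpty_cons, Bool.false_eq_true, if_false]
  exact h

theorem rep_cons_neg {kt : List Char} (v : List Char) {c : Char} {t : List Char}
    (h : ¬ ('#' :: kt) <+: (c :: t)) : rep kt v (c :: t) = c :: rep kt v t := by
  rw [rep, if_neg (fun hb => h (List.isPrefixOf_iff_prefix.mp hb))]

theorem rep_pos (kt v u : List Char) : rep kt v (('#' :: kt) ++ u) = v ++ rep kt v u := by
  rw [show ('#' :: kt) ++ u = '#' :: (kt ++ u) by simp]
  rw [rep, if_pos (List.isPrefixOf_iff_prefix.mpr (by simp [List.cons_prefix_cons, List.prefix_append]))]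
  simp

theorem rep_append_free (kt v : List Char) {s : List Char} (u : List Char) (hs : '#' ∉ s) :
    rep kt v (s ++ u) = s ++ rep kt v u := by
  induction s with
  | nil => simp
  | cons c s ih =>
    have hc : c ≠ '#' := fun h => hs (by simp [h])
    have : ¬ ('#' :: kt) <+: (c :: (s ++ u)) := by
      intro h
      exact hc ((List.cons_prefix_cons.mp h).1.symm)
    rw [List.cons_append, rep_cons_neg v this, ih (fun h => hs (by simp [h]))]
    simp

theorem rep_takeWhile (kt vt : List Char) (l : List Char) :
    (rep kt ('#' :: vt) l).takeWhile (fun c => c != '#') = l.takeWhile (fun c => c != '#') := by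
  fun_induction rep kt ('#' :: vt) l with
  | case1 => rfl
  | case2 c t hp ih =>
    have hc : c = '#' := ((List.cons_prefix_cons.mp (List.isPrefixOf_iff_prefix.mp hp)).1).symm
    subst hc
    simp [List.takeWhile]
  | case3 c t hp ih =>
    by_cases hc : c = '#'
    · subst hc; simp [List.takeWhile]
    · simp [List.takeWhile, ih]

theorem prefix_free_takeWhile {kt : List Char} (hk : '#' ∉ kt) :
    ∀ {Z : List Char}, kt <+: Z → kt <+: Z.takeWhile (fun c => c != '#') := by
  induction kt with
  | nil => intro Z _; exact List.nil_prefix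
  | cons c kt ih =>
    intro Z h
    match Z, h with
    | _ :: Z', h =>
      obtain ⟨hc, ht⟩ := List.cons_prefix_cons.mp h
      have hcne : c ≠ '#' := fun hh => hk (by simp [hh])
      subst hc
      have h2 := ih (fun hh => hk (by simp [hh])) ht
      have hpred : (c != '#') = true := by simp [hcne]
      rw [List.takeWhile_cons, hpred]
      simp only [if_true]
      exact List.cons_prefix_cons.mpr ⟨rfl, h2⟩

theorem prefix_iff_of_takeWhile_eq {kt Z Z' : List Char} (hk : '#' ∉ kt)
    (h : Z.takeWhile (fun c => c != '#') = Z'.takeWhile (fun c => c != '#')) :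
    (kt <+: Z ↔ kt <+: Z') := by
  constructor
  · intro hp
    exact (prefix_free_takeWhile hk hp).trans (h ▸ List.takeWhile_prefix _)
  · intro hp
    exact (prefix_free_takeWhile hk hp).trans (h ▸ List.takeWhile_prefix _)

-- the fold of A, at the char-list level
def comp (rs : List (List Char × List Char)) (l : List Char) : List Char :=
  rs.foldl (fun s r => PySem.Chars.replace s r.1 r.2) l

def goodRule (r : List Char × List Char) : Bool :=
  match r with
  | ('#' :: kt, '#' :: vt) => !kt.contains '#' && !vt.contains '#'
  | _ => false

theorem darkRules_good : ∀ r ∈ darkRules, goodRule r = true := by decide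

theorem goodRule_shape {r : List Char × List Char} (h : goodRule r = true) :
    ∃ kt vt, r.1 = '#' :: kt ∧ r.2 = '#' :: vt ∧ '#' ∉ kt ∧ '#' ∉ vt := by
  obtain ⟨k, v⟩ := r
  unfold goodRule at h
  split at h
  · rename_i kt vt heq
    rw [Bool.and_eq_true] at h
    have hk : k = '#' :: kt := congrArg Prod.fst heq
    have hv : v = '#' :: vt := congrArg Prod.snd heq
    subst hk; subst hv
    exact ⟨kt, vt, rfl, rfl, by simpa using h.1, by simpa using h.2⟩
  · exact absurd h (by simp)

theorem comp_nil {rs : List (List Char × List Char)} (hg : ∀ r ∈ rs, goodRule r = true) :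
    comp rs [] = [] := by
  induction rs with
  | nil => rfl
  | cons r rs ih =>
    obtain ⟨kt, vt, hk, hv, _, _⟩ := goodRule_shape (hg r (by simp))
    have h0 : comp (r :: rs) [] = comp rs (rep kt ('#' :: vt) []) := by
      rw [show comp (r :: rs) [] = comp rs (PySem.Chars.replace [] r.1 r.2) from rfl, hk, hv,
          replace_eq_rep]
    rw [h0, rep_nil]
    exact ih (fun r hr => hg r (by simp [hr]))

theorem comp_cons_ne {rs : List (List Char × List Char)} (hg : ∀ r ∈ rs, goodRule r = true)
    {c : Char} (hc : c ≠ '#') (t : List Char) : comp rs (c :: t) = c :: comp rs t := by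
  induction rs generalizing t with
  | nil => rfl
  | cons r rs ih =>
    obtain ⟨kt, vt, hk, hv, _, _⟩ := goodRule_shape (hg r (by simp))
    have h1 : ∀ x, comp (r :: rs) x = comp rs (rep kt ('#' :: vt) x) := by
      intro x
      rw [show comp (r :: rs) x = comp rs (PySem.Chars.replace x r.1 r.2) from rfl, hk, hv,
          replace_eq_rep]
    have hnp : ¬ ('#' :: kt) <+: (c :: t) := fun h => hc ((List.cons_prefix_cons.mp h).1).symm
    rw [h1, rep_cons_neg _ hnp, ih (fun r hr => hg r (by simp [hr])), h1]

theorem comp_append_free {rs : List (List Char × List Char)} (hg : ∀ r ∈ rs, goodRule r = true)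
    {s : List Char} (hs : '#' ∉ s) (u : List Char) : comp rs (s ++ u) = s ++ comp rs u := by
  induction rs generalizing u with
  | nil => rfl
  | cons r rs ih =>
    obtain ⟨kt, vt, hk, hv, _, _⟩ := goodRule_shape (hg r (by simp))
    have h1 : ∀ x, comp (r :: rs) x = comp rs (rep kt ('#' :: vt) x) := by
      intro x
      rw [show comp (r :: rs) x = comp rs (PySem.Chars.replace x r.1 r.2) from rfl, hk, hv,
          replace_eq_rep]
    rw [h1, rep_append_free _ _ _ hs, ih (fun r hr => hg r (by simp [hr])), h1]

theorem comp_hash_no_match {rs : List (List Char × List Char)} (hg : ∀ r ∈ rs, goodRule r = true)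
    {t : List Char} (hnm : ∀ r ∈ rs, ¬ r.1 <+: ('#' :: t)) :
    comp rs ('#' :: t) = '#' :: comp rs t := by
  induction rs generalizing t with
  | nil => rfl
  | cons r rs ih =>
    obtain ⟨kt, vt, hk, hv, hkf, hvf⟩ := goodRule_shape (hg r (by simp))
    have h1 : ∀ x, comp (r :: rs) x = comp rs (rep kt ('#' :: vt) x) := by
      intro x
      rw [show comp (r :: rs) x = comp rs (PySem.Chars.replace x r.1 r.2) from rfl, hk, hv,
          replace_eq_rep]
    have hnp : ¬ ('#' :: kt) <+: ('#' :: t) := hk ▸ hnm r (by simp)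
    have hg' : ∀ r ∈ rs, goodRule r = true := fun r hr => hg r (by simp [hr])
    have hnm' : ∀ r' ∈ rs, ¬ r'.1 <+: ('#' :: rep kt ('#' :: vt) t) := by
      intro r' hr'
      obtain ⟨kt', vt', hk', hv', hkf', hvf'⟩ := goodRule_shape (hg r' (by simp [hr']))
      rw [hk']
      intro hpre
      have h2 : kt' <+: rep kt ('#' :: vt) t := (List.cons_prefix_cons.mp hpre).2
      have h3 : kt' <+: t :=
        (prefix_iff_of_takeWhile_eq hkf' (rep_takeWhile kt vt t)).mp h2
      exact hnm r' (by simp [hr']) (hk' ▸ List.cons_prefix_cons.mpr ⟨rfl, h3⟩)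
    rw [h1, rep_cons_neg _ hnp, ih hg' hnm', h1]

-- after a replacement value has been emitted, no later rule can match on or across it
theorem comp_after_value {rs : List (List Char × List Char)} (hg : ∀ r ∈ rs, goodRule r = true)
    {vt : List Char} (hvf : '#' ∉ vt)
    (hsafe : ∀ r ∈ rs, ¬ r.1 <+: ('#' :: vt) ∧ ¬ ('#' :: vt) <+: r.1)
    (Y : List Char) : comp rs (('#' :: vt) ++ Y) = ('#' :: vt) ++ comp rs Y := by
  induction rs generalizing Y with
  | nil => rfl
  | cons r rs ih =>
    obtain ⟨kt, vt', hk, hv, hkf, hvf'⟩ := goodRule_shape (hg r (by simp))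
    have h1 : ∀ x, comp (r :: rs) x = comp rs (rep kt ('#' :: vt') x) := by
      intro x
      rw [show comp (r :: rs) x = comp rs (PySem.Chars.replace x r.1 r.2) from rfl, hk, hv,
          replace_eq_rep]
    have hnp : ¬ ('#' :: kt) <+: (('#' :: vt) ++ Y) := by
      intro h
      rcases List.prefix_or_prefix_of_prefix h (List.prefix_append ('#' :: vt) Y) with h2 | h2
      · exact (hsafe r (by simp)).1 (hk ▸ h2)
      · exact (hsafe r (by simp)).2 (hk ▸ h2)
    have h2 : ('#' :: vt) ++ Y = '#' :: (vt ++ Y) := by simp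
    rw [h1, h2, rep_cons_neg _ (h2 ▸ hnp), rep_append_free _ _ _ hvf]
    have h3 := ih (fun r hr => hg r (by simp [hr])) (fun r hr => hsafe r (by simp [hr])) (rep kt ('#' :: vt') Y)
    rw [show ('#' : Char) :: (vt ++ rep kt ('#' :: vt') Y) = ('#' :: vt) ++ rep kt ('#' :: vt') Y by simp, h3,
        h1 Y]

-- findRule characterisations
theorem findRule_none {rs : List (List Char × List Char)} {l : List Char}
    (h : findRule rs l = none) : ∀ r ∈ rs, ¬ r.1 <+: l := by
  induction rs with
  | nil => simp
  | cons r rs ih =>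
    obtain ⟨k, v⟩ := r
    by_cases hp : k.isPrefixOf l
    · simp [findRule, hp] at h
    · simp only [findRule, if_neg hp] at h
      intro r' hr'
      rcases List.mem_cons.mp hr' with h1 | h1
      · subst h1; exact fun hc => hp (List.isPrefixOf_iff_prefix.mpr hc)
      · exact ih h r' h1

theorem findRule_some_split {rs : List (List Char × List Char)} {l k v : List Char}
    (h : findRule rs l = some (k, v)) :
    ∃ pre post, rs = pre ++ (k, v) :: post ∧ (∀ r ∈ pre, ¬ r.1 <+: l) ∧ k <+: l := by
  induction rs with
  | nil => simp [findRule] at h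
  | cons r rs ih =>
    obtain ⟨k', v'⟩ := r
    by_cases hp : k'.isPrefixOf l
    · simp [findRule, hp] at h
      exact ⟨[], rs, by simp [h.1, h.2], by simp, h.1 ▸ List.isPrefixOf_iff_prefix.mp hp⟩
    · simp only [findRule, if_neg hp] at h
      obtain ⟨pre, post, h1, h2, h3⟩ := ih h
      refine ⟨(k', v') :: pre, post, by simp [h1], ?_, h3⟩
      intro r hr
      rcases List.mem_cons.mp hr with h4 | h4
      · subst h4; exact fun hc => hp (List.isPrefixOf_iff_prefix.mpr hc)
      · exact h2 r h4

-- the later-safety of the concrete table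
def laterSafe : List (List Char × List Char) → Bool
  | [] => true
  | r :: rest =>
      rest.all (fun r' => !(r'.1.isPrefixOf r.2) && !(r.2.isPrefixOf r'.1)) && laterSafe rest

theorem darkRules_laterSafe : laterSafe darkRules = true := by decide

theorem laterSafe_cons (r : List Char × List Char) (rest : List (List Char × List Char)) :
    laterSafe (r :: rest)
      = (rest.all (fun r' => !(r'.1.isPrefixOf r.2) && !(r.2.isPrefixOf r'.1)) && laterSafe rest) := rfl

theorem laterSafe_split {rs pre post : List (List Char × List Char)} {r : List Char × List Char}
    (hs : laterSafe rs = true) (h : rs = pre ++ r :: post) :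
    ∀ r' ∈ post, ¬ r'.1 <+: r.2 ∧ ¬ r.2 <+: r'.1 := by
  induction pre generalizing rs with
  | nil =>
    subst h
    rw [List.nil_append, laterSafe_cons, Bool.and_eq_true] at hs
    intro r' hr'
    have h3 := List.all_eq_true.mp hs.1 r' hr'
    simp only [Bool.and_eq_true, Bool.not_eq_true'] at h3
    constructor
    · intro hc
      rw [List.isPrefixOf_iff_prefix.mpr hc] at h3
      simp at h3
    · intro hc
      rw [List.isPrefixOf_iff_prefix.mpr hc] at h3
      simp at h3
  | cons q pre ih =>
    subst h
    rw [List.cons_append, laterSafe_cons, Bool.and_eq_true] at hs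
    exact ih hs.2 rfl

theorem scanGo_ne {c : Char} (hc : c ≠ '#') (t : List Char) :
    scanGo (c :: t) = c :: scanGo t := by
  rw [scanGo]
  simp [hc]

theorem scanGo_hash_none {t : List Char} (h : findRule darkRules ('#' :: t) = none) :
    scanGo ('#' :: t) = '#' :: scanGo t := by
  rw [scanGo]
  split
  · split <;> simp_all
  · simp_all

theorem scanGo_hash_some {t k v : List Char} (h : findRule darkRules ('#' :: t) = some (k, v)) :
    scanGo ('#' :: t) = v ++ scanGo (('#' :: t).drop k.length) := by
  rw [scanGo]
  split
  · split <;> simp_all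
  · simp_all

-- main induction: A's fold equals B's scan
theorem comp_eq_scanGo : ∀ n (l : List Char), l.length ≤ n → comp darkRules l = scanGo l := by
  intro n
  induction n with
  | zero =>
    intro l hl
    have : l = [] := List.eq_nil_of_length_eq_zero (Nat.le_zero.mp hl)
    subst this
    rw [comp_nil darkRules_good, scanGo]
  | succ n ih =>
    intro l hl
    match l with
    | [] => rw [comp_nil darkRules_good, scanGo]
    | c :: t =>
      by_cases hc : c = '#'
      · subst hc
        cases hr : findRule darkRules ('#' :: t) with
        | none =>
          rw [comp_hash_no_match darkRules_good (findRule_none hr), scanGo_hash_none hr,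
              ih t (by simp at hl; omega)]
        | some kv =>
          obtain ⟨k, v⟩ := kv
          obtain ⟨pre, post, hsplit, hpre, hkp⟩ := findRule_some_split hr
          have hmem : (k, v) ∈ darkRules := by rw [hsplit]; simp
          obtain ⟨kt, vt, hk, hv, hkf, hvf⟩ := goodRule_shape (darkRules_good _ hmem)
          simp only at hk hv
          obtain ⟨u, hu⟩ := hkp
          -- l = k ++ u
          have hgpre : ∀ r ∈ pre, goodRule r = true := by
            intro r hrm; exact darkRules_good r (by rw [hsplit]; simp [hrm])
          have hgpost : ∀ r ∈ post, goodRule r = true := by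
            intro r hrm; exact darkRules_good r (by rw [hsplit]; simp [hrm])
          have hsafe := laterSafe_split darkRules_laterSafe hsplit
          -- unfold the fold along the split
          have hcomp : comp darkRules ('#' :: t)
              = comp post (PySem.Chars.replace (comp pre ('#' :: t)) k v) := by
            rw [hsplit]; simp [comp, List.foldl_append]
          -- stage 1: the earlier rules leave k ++ u with only u rewritten
          have h0 : '#' :: t = '#' :: (kt ++ u) := by
            rw [← hu, hk]; simp
          have hnm1 : ∀ r ∈ pre, ¬ r.1 <+: ('#' :: (kt ++ u)) := by
            intro r hrm hp
            rw [← h0] at hp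
            exact hpre r hrm hp
          have hstage1 : comp pre ('#' :: t) = k ++ comp pre u := by
            rw [h0, comp_hash_no_match hgpre hnm1, comp_append_free hgpre hkf u, hk]
            simp
          -- stage 2: the matching rule fires at position 0
          have hstage2 : PySem.Chars.replace (k ++ comp pre u) k v
              = v ++ PySem.Chars.replace (comp pre u) k v := by
            rw [hk, hv, replace_eq_rep, replace_eq_rep, rep_pos]
          -- stage 3: the later rules do not touch the emitted value
          have hstage3 : comp post (v ++ PySem.Chars.replace (comp pre u) k v)
              = v ++ comp post (PySem.Chars.replace (comp pre u) k v) := by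
            rw [hv]
            exact comp_after_value hgpost hvf
              (fun r hrm => (hv ▸ hsafe r hrm : _)) _
          have hfold : comp post (PySem.Chars.replace (comp pre u) k v) = comp darkRules u := by
            rw [hsplit]; simp [comp, List.foldl_append]
          rw [hcomp, hstage1, hstage2, hstage3, hfold]
          -- B's side
          rw [scanGo_hash_some hr]
          have hdrop : ('#' :: t).drop k.length = u := by
            rw [← hu]; exact List.drop_left
          rw [hdrop, ih u ?_]
          have hkl : 0 < k.length := by rw [hk]; simp
          have : ('#' :: t).length = k.length + u.length := by rw [← hu]; simp
          simp at hl this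
          omega
      · rw [comp_cons_ne darkRules_good hc, scanGo_ne hc t, ih t (by simp at hl; omega)]

theorem items_darkAdjustmentsDict :
    darkAdjustmentsDict.items
      = [("#ffffff", "#1a1a1a"), ("#fff", "#1a1a1a"), ("#333333", "#e8e8e8"),
         ("#333", "#e8e8e8"), ("#555555", "#b0b0b0"), ("#555", "#b0b0b0"),
         ("#000000", "#ffffff"), ("#000", "#ffffff"), ("#f8f9fa", "#2c3e50"),
         ("#ecf0f1", "#2c3e50"), ("#f7f7f7", "#2c3e50")] := by decide

-- the String-level fold of A computes comp on toList
theorem foldl_replace_toList (rs : List (String × String)) (s : String) :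
    (rs.foldl (fun acc p => PySem.Str.replace acc p.1 p.2) s).toList
      = comp (rs.map (fun p => (p.1.toList, p.2.toList))) s.toList := by
  induction rs generalizing s with
  | nil => rfl
  | cons r rs ih =>
    rw [List.foldl_cons, ih]
    simp only [List.map_cons]
    have : (PySem.Str.replace s r.1 r.2).toList = PySem.Chars.replace s.toList r.1.toList r.2.toList := by
      rw [PySem.Str.replace, String.toList_ofList]
    rw [show comp ((r.1.toList, r.2.toList) :: rs.map (fun p => (p.1.toList, p.2.toList))) s.toList
          = comp (rs.map (fun p => (p.1.toList, p.2.toList))) (PySem.Chars.replace s.toList r.1.toList r.2.toList) from rfl,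
        this]

-- ===== VERDICT (by name: the statement is the Claim_ definition above) =====
theorem apply_dark_mode_adjustments_to_style_py_spec : Claim_equal_apply_dark_mode_adjustments_to_style_py := by
  intro style _
  show apply_dark_mode_adjustments_to_style_py style = apply_dark_mode_adjustments_to_style_py_alt style
  have h1 : (apply_dark_mode_adjustments_to_style_py style).toList
      = (apply_dark_mode_adjustments_to_style_py_alt style).toList := by
    rw [apply_dark_mode_adjustments_to_style_py, items_darkAdjustmentsDict,
        foldl_replace_toList, apply_dark_mode_adjustments_to_style_py_alt, String.toList_ofList]
    rw [show ([("#ffffff", "#1a1a1a"), ("#fff", "#1a1a1a"), ("#333333", "#e8e8e8"),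
         ("#333", "#e8e8e8"), ("#555555", "#b0b0b0"), ("#555", "#b0b0b0"),
         ("#000000", "#ffffff"), ("#000", "#ffffff"), ("#f8f9fa", "#2c3e50"),
         ("#ecf0f1", "#2c3e50"), ("#f7f7f7", "#2c3e50")] : List (String × String)).map
          (fun p => (p.1.toList, p.2.toList)) = darkRules from rfl]
    exact comp_eq_scanGo style.toList.length style.toList (le_refl _)
  exact String.toList_inj.mp h1
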